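-- pv_equiv track=rewrite | github.com/SatishoBananamoto/svx | src/svx/parser.py | _tee_targets
-- ===== SOURCE A (Python) =====
-- WRITE_REDIRECT_OPERATORS = {">", ">>", ">|", "&>"}
--
-- CONTROL_TOKENS = {"|", "&&", "||", ";"}
--
-- def _tee_targets(tokens: list[str]) -> list[str]:
--     targets = []
--     index = 0
--     while index < len(tokens):
--         segment = []
--         while index < len(tokens) and tokens[index] != "|":
--             segment.append(tokens[index])
--             index += 1
--
--         if segment and segment[0] == "tee":
--             targets.extend(_tee_segment_targets(segment))
--
--         index += 1
--     return targets
--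
-- def _tee_segment_targets(segment: list[str]) -> list[str]:
--     targets = []
--     end_of_options = False
--     for token in segment[1:]:
--         if token == "--":
--             end_of_options = True
--             continue
--         if not end_of_options and token.startswith("-"):
--             continue
--         if token in WRITE_REDIRECT_OPERATORS or token in CONTROL_TOKENS:
--             continue
--         if _looks_like_file_target(token):
--             targets.append(token)
--     return targets
--
-- def _looks_like_file_target(token: str) -> bool:
--     if not token:
--         return False
--     if token in CONTROL_TOKENS:
--         return False
--     if token in WRITE_REDIRECT_OPERATORS or token in {"<", "<<", "<<<"}:
--         return False
--     if token.startswith("&"):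
--         return False
--     return True
-- ===== SOURCE B (Python) =====
-- WRITE_REDIRECT_OPERATORS = {">", ">>", ">|", "&>"}
--
-- CONTROL_TOKENS = {"|", "&&", "||", ";"}
--
--
-- def _is_target(token, after_ddash):
--     return (not (not after_ddash and token.startswith("-"))
--             and token not in WRITE_REDIRECT_OPERATORS
--             and token not in CONTROL_TOKENS
--             and not (not token
--                      or token in {"<", "<<", "<<<"}
--                      or token.startswith("&")))
--
--
-- def _tee_targets(tokens):
--     # single streaming pass: no segment lists are ever built
--     targets = []
--     state = "head"      # "head": next token starts a segment; "tee"/"skip": inside one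
--     after_ddash = False
--     for tok in tokens:
--         if tok == "|":
--             state = "head"
--         elif state == "head":
--             state = "tee" if tok == "tee" else "skip"
--             after_ddash = False
--         elif state == "tee":
--             if tok == "--":
--                 after_ddash = True
--             elif _is_target(tok, after_ddash):
--                 targets.append(tok)
--     return targets
-- ===== Notes on version B (the rewrite author's own statement) =====
-- stated objective: alternative
-- what changed: B replaces A's two nested index-based while-loops that materialise each pipe segment as a list and then filter it, by a single streaming pass with a three-valued state machine (head/tee/skip) plus an after-'--' flag that never builds any segment and emits targets on the fly.
import Mathlib
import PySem

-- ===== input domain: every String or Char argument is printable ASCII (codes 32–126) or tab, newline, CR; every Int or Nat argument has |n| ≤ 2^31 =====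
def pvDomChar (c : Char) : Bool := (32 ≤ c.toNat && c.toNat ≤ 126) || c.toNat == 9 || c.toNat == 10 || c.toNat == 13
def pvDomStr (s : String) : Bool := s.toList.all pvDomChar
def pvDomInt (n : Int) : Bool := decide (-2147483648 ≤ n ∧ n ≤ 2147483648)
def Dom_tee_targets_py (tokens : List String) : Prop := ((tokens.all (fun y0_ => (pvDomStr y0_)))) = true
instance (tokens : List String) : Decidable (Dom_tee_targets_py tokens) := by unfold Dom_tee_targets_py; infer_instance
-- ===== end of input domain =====

-- B replaces A's nested while-loops that build each pipe segment as a list and then filter it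
-- by a single streaming pass with a head/tee/skip state machine that never materialises a segment.

-- ===== PORT A =====
def pvWR : List String := [">", ">>", ">|", "&>"]
def pvCT : List String := ["|", "&&", "||", ";"]

def pvLooksLikeFileTarget (token : String) : Bool :=
  if token == "" then false
  else if pvCT.contains token then false
  else if pvWR.contains token || (["<", "<<", "<<<"] : List String).contains token then false
  else if PySem.Str.startswith token "&" then false
  else true

def pvSegBody (st : List String × Bool) (token : String) : List String × Bool :=
  if token == "--" then (st.1, true)
  else if !st.2 && PySem.Str.startswith token "-" then st
  else if pvWR.contains token || pvCT.contains token then st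
  else if pvLooksLikeFileTarget token then (st.1 ++ [token], st.2)
  else st

def pvTeeSegmentTargets (segment : List String) : List String :=
  ((segment.drop 1).foldl pvSegBody ([], false)).1

-- inner while: consume tokens until "|", appending to segment; returns (segment, rest)
def pvInnerWhile (rest : List String) (segment : List String) : List String × List String :=
  match rest with
  | [] => (segment, [])
  | t :: ts => if t ≠ "|" then pvInnerWhile ts (segment ++ [t]) else (segment, t :: ts)

theorem pvInnerWhile_len (rest segment : List String) :
    (pvInnerWhile rest segment).2.length ≤ rest.length := by
  induction rest generalizing segment with
  | nil => simp [pvInnerWhile]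
  | cons t ts ih =>
    simp only [pvInnerWhile]
    split
    · exact Nat.le_trans (ih _) (by simp)
    · simp

-- outer while over the remaining tokens, accumulating targets
def pvOuterWhile (rest : List String) (targets : List String) : List String :=
  match rest with
  | [] => targets
  | t :: ts =>
    let p := pvInnerWhile (t :: ts) []
    let targets' := if !p.1.isEmpty && (p.1.head? == some "tee")
                    then targets ++ pvTeeSegmentTargets p.1 else targets
    pvOuterWhile (p.2.drop 1) targets'
termination_by rest.length
decreasing_by
  have h := pvInnerWhile_len (t :: ts) []
  have : (pvInnerWhile (t :: ts) []).2.length - 1 < (t :: ts).length := by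
    simp at h ⊢; omega
  simpa using this

def tee_targets_py (tokens : List String) : List String :=
  pvOuterWhile tokens []

-- ===== PORT B =====
inductive PvSt
  | head | tee | skip
deriving DecidableEq, Repr

def pvIsTarget (token : String) (after : Bool) : Bool :=
  !(!after && PySem.Str.startswith token "-")
  && !(pvWR.contains token)
  && !(pvCT.contains token)
  && !((token == "") || (["<", "<<", "<<<"] : List String).contains token
        || PySem.Str.startswith token "&")

def pvStream (st : List String × PvSt × Bool) (tok : String) : List String × PvSt × Bool :=
  if tok == "|" then (st.1, PvSt.head, st.2.2)
  else match st.2.1 with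
  | PvSt.head => (st.1, if tok == "tee" then PvSt.tee else PvSt.skip, false)
  | PvSt.tee =>
      if tok == "--" then (st.1, PvSt.tee, true)
      else if pvIsTarget tok st.2.2 then (st.1 ++ [tok], PvSt.tee, st.2.2)
      else st
  | PvSt.skip => st

def tee_targets_py_alt (tokens : List String) : List String :=
  (tokens.foldl pvStream ([], PvSt.head, false)).1

-- ===== PRECONDITION & SPEC =====
def Spec_tee_targets_py (tokens : List String) (out : List String) : Prop := out = tee_targets_py_alt tokens
instance (tokens : List String) (out : List String) : Decidable (Spec_tee_targets_py tokens out) := by unfold Spec_tee_targets_py; infer_instance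

-- ===== CLAIM =====
def Claim_equal_tee_targets_py : Prop := ∀ (tokens : List String), Dom_tee_targets_py tokens → Spec_tee_targets_py tokens (tee_targets_py tokens)

-- ===== LEMMAS AND PROOFS =====

def pvP : String → Bool := fun t => t != "|"

theorem pvInnerWhile_eq (rest : List String) (seg : List String) :
    pvInnerWhile rest seg = (seg ++ rest.takeWhile pvP, rest.dropWhile pvP) := by
  induction rest generalizing seg with
  | nil => simp [pvInnerWhile]
  | cons t ts ih =>
    simp only [pvInnerWhile]
    by_cases h : t = "|"
    · subst h; simp [pvP, List.takeWhile, List.dropWhile]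
    · rw [if_pos h, ih]
      simp [pvP, h]

theorem pvOuter_append_aux (n : Nat) : ∀ (rest : List String), rest.length ≤ n →
    ∀ targets : List String, pvOuterWhile rest targets = targets ++ pvOuterWhile rest [] := by
  induction n with
  | zero =>
    intro rest h targets
    have : rest = [] := by cases rest <;> simp_all
    subst this; simp [pvOuterWhile]
  | succ n ih =>
    intro rest hle targets
    match rest with
    | [] => simp [pvOuterWhile]
    | t :: ts =>
      rw [pvOuterWhile, pvOuterWhile]
      have hlen : ((pvInnerWhile (t :: ts) []).2.drop 1).length ≤ n := by
        have := pvInnerWhile_len (t :: ts) []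
        have hb : (t :: ts).length = ts.length + 1 := by simp
        rw [hb] at this hle
        simp at this ⊢; omega
      split
      · rw [ih _ hlen]
        conv_rhs => rw [ih _ hlen]
        simp
      · exact ih _ hlen targets

theorem pvOuter_append (rest : List String) (targets : List String) :
    pvOuterWhile rest targets = targets ++ pvOuterWhile rest [] :=
  pvOuter_append_aux rest.length rest le_rfl targets

set_option maxHeartbeats 1000000 in
-- one tee-state stream step agrees with A's segment-filter body (for non-"|" tokens)
theorem pvStream_tee_step (tg : List String) (a : Bool) (tok : String) (h : tok ≠ "|") :
    pvStream (tg, PvSt.tee, a) tok =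
      ((pvSegBody (tg, a) tok).1, PvSt.tee, (pvSegBody (tg, a) tok).2) := by
  simp only [pvStream]
  rw [if_neg (by simpa using h)]
  simp only [pvSegBody, pvIsTarget, pvLooksLikeFileTarget]
  split_ifs <;> simp_all

-- pvSegBody's accumulator splits off
theorem pvSegBody_acc (toks : List String) : ∀ (l : List String) (a : Bool),
    toks.foldl pvSegBody (l, a) =
      (l ++ (toks.foldl pvSegBody ([], a)).1, (toks.foldl pvSegBody ([], a)).2) := by
  induction toks with
  | nil => simp
  | cons t ts ih =>
    intro l a
    simp only [List.foldl_cons]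
    have hstep : pvSegBody (l, a) t =
        (l ++ (pvSegBody ([], a) t).1, (pvSegBody ([], a) t).2) := by
      unfold pvSegBody; split_ifs <;> simp
    rw [hstep]
    obtain ⟨l0, a0⟩ := pvSegBody ([], a) t
    rw [ih (l ++ l0) a0, ih l0 a0]
    simp

-- streaming in tee state over a pipe-free prefix = A's segment filter fold
theorem pvStream_tee (toks : List String) (hn : ∀ x ∈ toks, x ≠ "|") (tg : List String) (a : Bool) :
    toks.foldl pvStream (tg, PvSt.tee, a) =
      ((toks.foldl pvSegBody (tg, a)).1, PvSt.tee, (toks.foldl pvSegBody (tg, a)).2) := by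
  induction toks generalizing tg a with
  | nil => simp
  | cons t ts ih =>
    simp only [List.foldl_cons]
    rw [pvStream_tee_step tg a t (hn t (by simp))]
    rw [ih (fun x hx => hn x (by simp [hx]))]

-- streaming in skip state over a pipe-free prefix does nothing
theorem pvStream_skip (toks : List String) (hn : ∀ x ∈ toks, x ≠ "|") (tg : List String) (a : Bool) :
    toks.foldl pvStream (tg, PvSt.skip, a) = (tg, PvSt.skip, a) := by
  induction toks with
  | nil => simp
  | cons t ts ih =>
    simp only [List.foldl_cons]
    have h1 : pvStream (tg, PvSt.skip, a) t = (tg, PvSt.skip, a) := by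
      unfold pvStream
      rw [if_neg (by simpa using hn t (by simp))]
    rw [h1]; exact ih (fun x hx => hn x (by simp [hx]))

theorem pvDrop_head (l : List String) : ∀ x xs, l.dropWhile pvP = x :: xs → x = "|" := by
  induction l with
  | nil => intro x xs h; simp [List.dropWhile] at h
  | cons t ts ih =>
    intro x xs h
    by_cases ht : t = "|"
    · subst ht; simp [List.dropWhile, pvP] at h; exact h.1.symm
    · rw [List.dropWhile_cons_of_pos (by simp [pvP, ht])] at h
      exact ih x xs h

theorem pvTake_ne (ts : List String) : ∀ x ∈ ts.takeWhile pvP, x ≠ "|" := by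
  intro x hx
  have hp : pvP x = true := List.mem_takeWhile_imp hx
  simpa [pvP] using hp

theorem pvStream_pipe (tg : List String) (s : PvSt) (a : Bool) :
    pvStream (tg, s, a) "|" = (tg, PvSt.head, a) := by
  unfold pvStream; simp

-- main invariant: streaming from head state = A's outer while loop
theorem pvMain_aux (n : Nat) : ∀ (rest : List String), rest.length ≤ n →
    ∀ (tg : List String) (a : Bool),
      (rest.foldl pvStream (tg, PvSt.head, a)).1 = tg ++ pvOuterWhile rest [] := by
  induction n with
  | zero =>
    intro rest h tg a
    have : rest = [] := by cases rest <;> simp_all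
    subst this; simp [pvOuterWhile]
  | succ n ih =>
    intro rest hle tg a
    match rest with
    | [] => simp [pvOuterWhile]
    | t :: ts =>
      rw [pvOuterWhile, pvInnerWhile_eq]
      have hrest : ∀ (tg' : List String) (s : PvSt) (a' : Bool),
          ((ts.dropWhile pvP).foldl pvStream (tg', s, a')).1 =
            tg' ++ pvOuterWhile ((ts.dropWhile pvP).drop 1) [] := by
        intro tg' s a'
        cases hd : ts.dropWhile pvP with
        | nil => simp [pvOuterWhile]
        | cons x xs =>
          have hx : x = "|" := pvDrop_head ts x xs hd
          subst hx
          simp only [List.foldl_cons, pvStream_pipe, List.drop_succ_cons, List.drop_zero]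
          have hlen : xs.length ≤ n := by
            have h2 : (ts.dropWhile pvP).length ≤ ts.length := List.length_dropWhile_le _ _
            rw [hd] at h2
            simp at h2 hle
            omega
          exact ih xs hlen tg' a'
      by_cases ht : t = "|"
      · subst ht
        have hlen : ts.length ≤ n := by simp at hle; omega
        have hrec := ih ts hlen tg a
        simp only [List.foldl_cons, pvStream_pipe]
        rw [List.takeWhile_cons_of_neg (by simp [pvP]),
            List.dropWhile_cons_of_neg (by simp [pvP])]
        simpa using hrec
      · have hsplit : ts = ts.takeWhile pvP ++ ts.dropWhile pvP :=
          (List.takeWhile_append_dropWhile (p := pvP) (l := ts)).symm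
        rw [List.takeWhile_cons_of_pos (by simp [pvP, ht]),
            List.dropWhile_cons_of_pos (by simp [pvP, ht])]
        by_cases htee : t = "tee"
        · subst htee
          have hstep : pvStream (tg, PvSt.head, a) "tee" = (tg, PvSt.tee, false) := by
            unfold pvStream; simp
          simp only [List.foldl_cons, hstep]
          conv_lhs => rw [hsplit, List.foldl_append]
          rw [pvStream_tee (ts.takeWhile pvP) (pvTake_ne ts) tg false, pvSegBody_acc, hrest]
          rw [if_pos (by simp)]
          have hT : pvTeeSegmentTargets ("tee" :: ts.takeWhile pvP) =
              ((ts.takeWhile pvP).foldl pvSegBody ([], false)).1 := by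
            simp [pvTeeSegmentTargets]
          simp only [List.nil_append]
          rw [hT]
          simp only [List.append_assoc, List.drop_one]
          exact congrArg (fun z => tg ++ z) (pvOuter_append _ _).symm
        · have hstep : pvStream (tg, PvSt.head, a) t = (tg, PvSt.skip, false) := by
            unfold pvStream
            rw [if_neg (by simpa using ht)]
            simp [htee]
          simp only [List.foldl_cons, hstep]
          conv_lhs => rw [hsplit, List.foldl_append]
          rw [pvStream_skip (ts.takeWhile pvP) (pvTake_ne ts) tg false, hrest]
          rw [if_neg (by simp [htee])]

-- ===== VERDICT =====
theorem tee_targets_py_spec : Claim_equal_tee_targets_py := by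
  intro tokens _
  unfold Spec_tee_targets_py tee_targets_py tee_targets_py_alt
  rw [pvMain_aux tokens.length tokens le_rfl [] false]
  simp
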